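-- pv_equiv track=rewrite | github.com/adnathanail/aoc | 2022/day8/part1.py | check_tree_visibility
-- ===== SOURCE A (Python) =====
-- from typing import Generator
--
-- def check_tree_visibility(
--         tree_height_grid: list[list[int]],
--         coords: Generator[list[tuple[int, int]], None, None]
-- ) -> set[tuple[int, int]]:
--     visible_trees = set()
--     for coord_list in coords:
--         last_highest_tree_height = -1
--         for coord in coord_list:
--             i, j = coord
--             if tree_height_grid[i][j] > last_highest_tree_height:
--                 visible_trees.add(coord)
--                 last_highest_tree_height = tree_height_grid[i][j]
--     return visible_trees
-- ===== SOURCE B (Python) =====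
-- def check_tree_visibility(tree_height_grid, coords):
--     visible_trees = set()
--     for coord_list in coords:
--         # pass 1: materialize the heights along the scan line
--         heights = [tree_height_grid[i][j] for i, j in coord_list]
--         # pass 2: exclusive prefix-maximum table, seeded with -1
--         prefix = [-1]
--         for h in heights:
--             prefix.append(prefix[-1] if prefix[-1] > h else h)
--         # pass 3: a tree is visible iff it beats every strictly-earlier tree
--         for coord, h, m in zip(coord_list, heights, prefix):
--             if h > m:
--                 visible_trees.add(coord)
--     return visible_trees
-- ===== Notes on version B (the rewrite author's own statement) =====
-- stated objective: alternative
-- what changed: Replaces A's fused update-the-running-max-as-you-scan loop by three separate passes per scan line: materialize the heights, build an exclusive prefix-maximum table, then zip coords/heights/table and keep a coord exactly when its height beats its exclusive prefix max.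
import Mathlib
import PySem

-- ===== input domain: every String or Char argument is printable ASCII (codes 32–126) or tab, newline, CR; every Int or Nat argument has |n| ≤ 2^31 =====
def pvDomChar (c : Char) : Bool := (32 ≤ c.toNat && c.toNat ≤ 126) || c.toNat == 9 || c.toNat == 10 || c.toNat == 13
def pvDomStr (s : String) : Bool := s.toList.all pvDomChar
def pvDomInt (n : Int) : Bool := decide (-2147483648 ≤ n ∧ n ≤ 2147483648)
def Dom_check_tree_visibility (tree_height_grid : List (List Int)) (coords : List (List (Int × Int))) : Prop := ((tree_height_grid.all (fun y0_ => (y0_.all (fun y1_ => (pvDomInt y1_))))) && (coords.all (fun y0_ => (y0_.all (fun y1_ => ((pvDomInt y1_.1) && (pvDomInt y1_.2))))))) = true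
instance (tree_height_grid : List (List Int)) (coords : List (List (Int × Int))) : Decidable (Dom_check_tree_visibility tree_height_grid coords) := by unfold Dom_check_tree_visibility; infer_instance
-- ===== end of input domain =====

-- B replaces A's fused running-max scan by three separate passes per scan line
-- (materialize heights, build the exclusive prefix-maximum table, zip-and-filter);
-- objective: alternative decomposition, same cost.

-- tree_height_grid[i][j], total form; exact under Pre_ (both indices in range)
def pvGetHeight (tree_height_grid : List (List Int)) (c : Int × Int) : Int :=
  PySem.List.pyGetD (PySem.List.pyGetD tree_height_grid c.1 []) c.2 0

-- ===== PORT A =====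
def check_tree_visibility (tree_height_grid : List (List Int)) (coords : List (List (Int × Int))) : List (Int × Int) :=
  coords.foldl
    (fun visible_trees coord_list =>
      (coord_list.foldl
        (fun (st : PySem.Set (Int × Int) × Int) coord =>
          if pvGetHeight tree_height_grid coord > st.2 then
            (PySem.Set.add st.1 coord, pvGetHeight tree_height_grid coord)
          else st)
        (visible_trees, -1)).1)
    PySem.Set.empty

-- ===== PORT B =====
-- pass 2 of Source B: prefix = [-1]; for h in heights: prefix.append(max-ish step)
def pvPrefixTable (seed : Int) (heights : List Int) : List Int :=
  List.scanl (fun m h => if m > h then m else h) seed heights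

def check_tree_visibility_alt (tree_height_grid : List (List Int)) (coords : List (List (Int × Int))) : List (Int × Int) :=
  coords.foldl
    (fun visible_trees coord_list =>
      let heights := coord_list.map (pvGetHeight tree_height_grid)
      let ptable := pvPrefixTable (-1) heights
      (List.zip coord_list (List.zip heights ptable)).foldl
        (fun visible_trees p =>
          if p.2.1 > p.2.2 then PySem.Set.add visible_trees p.1 else visible_trees)
        visible_trees)
    PySem.Set.empty

-- ===== PRECONDITION & SPEC =====
-- Pre_ excludes exactly the inputs where some coordinate is out of range for the grid,
-- on which Python A (and B alike) raises IndexError.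
def Pre_check_tree_visibility (tree_height_grid : List (List Int)) (coords : List (List (Int × Int))) : Prop :=
  ∀ cl ∈ coords, ∀ c ∈ cl,
    PySem.Raise.InRange tree_height_grid.length c.1 ∧
    PySem.Raise.InRange (PySem.List.pyGetD tree_height_grid c.1 []).length c.2
instance (tree_height_grid : List (List Int)) (coords : List (List (Int × Int))) : Decidable (Pre_check_tree_visibility tree_height_grid coords) := by unfold Pre_check_tree_visibility; infer_instance

def pvWitness_check_tree_visibility : List (List Int) × (List (List (Int × Int))) :=
  ([[3, 0, 3], [2, 5, 2]], [[(0, 0), (0, 1), (0, 2)], [(1, 2), (1, 1), (1, 0)]])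

def Spec_check_tree_visibility (tree_height_grid : List (List Int)) (coords : List (List (Int × Int))) (out : List (Int × Int)) : Prop := out = check_tree_visibility_alt tree_height_grid coords
instance (tree_height_grid : List (List Int)) (coords : List (List (Int × Int))) (out : List (Int × Int)) : Decidable (Spec_check_tree_visibility tree_height_grid coords out) := by unfold Spec_check_tree_visibility; infer_instance

-- ===== CLAIM (what is proved, stated in full; the proofs are below) =====
def Claim_equal_check_tree_visibility : Prop := ∀ (tree_height_grid : List (List Int)) (coords : List (List (Int × Int))), Dom_check_tree_visibility tree_height_grid coords → Pre_check_tree_visibility tree_height_grid coords → Spec_check_tree_visibility tree_height_grid coords (check_tree_visibility tree_height_grid coords)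

-- ===== LEMMAS AND PROOFS =====

-- core invariant: on one scan line, A's fused running-max fold (accumulator m) equals
-- B's zip-and-filter over the prefix table seeded with m
theorem pv_line_eq (g : List (List Int)) :
    ∀ (cl : List (Int × Int)) (vis : PySem.Set (Int × Int)) (m : Int),
    (cl.foldl
        (fun (st : PySem.Set (Int × Int) × Int) coord =>
          if pvGetHeight g coord > st.2 then
            (PySem.Set.add st.1 coord, pvGetHeight g coord)
          else st)
        (vis, m)).1
    = (List.zip cl (List.zip (cl.map (pvGetHeight g)) (pvPrefixTable m (cl.map (pvGetHeight g))))).foldl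
        (fun visible_trees p =>
          if p.2.1 > p.2.2 then PySem.Set.add visible_trees p.1 else visible_trees)
        vis := by
  intro cl
  induction cl with
  | nil => intro vis m; rfl
  | cons c cs ih =>
    intro vis m
    simp only [List.map_cons, pvPrefixTable, List.scanl_cons, List.zip_cons_cons, List.foldl_cons]
    by_cases h : pvGetHeight g c > m
    · have hm : (if m > pvGetHeight g c then m else pvGetHeight g c) = pvGetHeight g c := by
        split <;> omega
      simp only [if_pos h, hm, ih, pvPrefixTable]
    · have hm : (if m > pvGetHeight g c then m else pvGetHeight g c) = m := by
        split <;> omega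
      simp only [if_neg h, hm, ih, pvPrefixTable]

-- ===== VERDICT (by name: the statement is the Claim_ definition above) =====
theorem check_tree_visibility_spec : Claim_equal_check_tree_visibility := by
  intro g coords _ _
  unfold Spec_check_tree_visibility check_tree_visibility check_tree_visibility_alt
  simp only [pv_line_eq]
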